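-- pv_equiv track=rewrite | github.com/2cla/competitive-programming-solutions | codeforces/1977C.py | check
-- ===== SOURCE A (Python) =====
-- from math import lcm
--
-- def check(p,a):
--     c,l=0,1
--     for aa in a:
--         l2=lcm(l,aa)
--         if p%l2:continue
--         l=l2
--         c+=1
--     return c if l==p else 0
-- ===== SOURCE B (Python) =====
-- from math import lcm
--
-- def check(p, a):
--     # Filter first, then one lcm over the kept elements: the running LCM in A
--     # always divides p, so A's skip test is equivalent to a plain p % aa test.
--     d = [aa for aa in a if p % aa == 0]
--     return len(d) if lcm(*d) == p else 0
-- ===== Notes on version B (the rewrite author's own statement) =====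
-- stated objective: simpler
-- what changed: Replaces the loop threading a running LCM with a skip test by a filter of the elements dividing p followed by a single lcm call over them, using the invariant that the running LCM always divides p.
import Mathlib
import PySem

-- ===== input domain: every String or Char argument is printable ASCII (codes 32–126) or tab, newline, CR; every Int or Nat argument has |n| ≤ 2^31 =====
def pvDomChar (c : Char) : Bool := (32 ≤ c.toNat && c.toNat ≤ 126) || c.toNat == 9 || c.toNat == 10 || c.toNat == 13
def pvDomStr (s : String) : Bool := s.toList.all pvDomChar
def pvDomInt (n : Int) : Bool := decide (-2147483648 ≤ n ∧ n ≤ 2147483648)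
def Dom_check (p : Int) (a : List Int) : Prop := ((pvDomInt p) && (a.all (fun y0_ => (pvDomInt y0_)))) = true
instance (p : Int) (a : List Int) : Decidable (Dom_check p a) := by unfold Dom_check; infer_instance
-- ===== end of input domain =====

-- B replaces A's running-LCM-with-skip-test loop by a filter of the elements dividing p
-- followed by one lcm over them (objective: simpler); equivalence of RETURN values on zero-free lists.

-- ===== PORT A =====
def check (p : Int) (a : List Int) : Int :=
  let cl := a.foldl (fun (cl : Int × Int) aa =>
    let l2 : Int := (Int.lcm cl.2 aa : Int)       -- math.lcm: nonnegative lcm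
    if PySem.Int.mod p l2 ≠ 0 then cl            -- `if p%l2: continue`
    else (cl.1 + 1, l2)) (0, 1)
  if cl.2 = p then cl.1 else 0

-- ===== PORT B =====
def check_alt (p : Int) (a : List Int) : Int :=
  let d := a.filter (fun aa => PySem.Int.mod p aa = 0)
  if d.foldl (fun acc aa => (Int.lcm acc aa : Int)) 1 = p then (d.length : Int) else 0

-- ===== PRECONDITION & SPEC =====
-- Pre_ excludes lists containing 0: on those both Pythons raise ZeroDivisionError (A via p % lcm(l,0), B via p % 0).
def Pre_check (p : Int) (a : List Int) : Prop := (0 : Int) ∉ a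
instance (p : Int) (a : List Int) : Decidable (Pre_check p a) := by unfold Pre_check; infer_instance
def pvWitness_check : Int × List Int := (6, [2, 3, 5])
def Spec_check (p : Int) (a : List Int) (out : Int) : Prop := out = check_alt p a
instance (p : Int) (a : List Int) (out : Int) : Decidable (Spec_check p a out) := by unfold Spec_check; infer_instance

-- ===== CLAIM (what is proved, stated in full; the proofs are below) =====
def Claim_equal_check : Prop := ∀ (p : Int) (a : List Int), Dom_check p a → Pre_check p a → Spec_check p a (check p a)

-- ===== LEMMAS AND PROOFS =====

-- A's loop, generalized over the state.
def loopA (p : Int) (a : List Int) (cl : Int × Int) : Int × Int :=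
  a.foldl (fun (cl : Int × Int) aa =>
    let l2 : Int := (Int.lcm cl.2 aa : Int)
    if PySem.Int.mod p l2 ≠ 0 then cl else (cl.1 + 1, l2)) cl

lemma lcm_ne_zero {l aa : Int} (hl : l ≠ 0) (ha : aa ≠ 0) : ((Int.lcm l aa : Int) : Int) ≠ 0 := by
  simp [Int.lcm_eq_zero_iff, hl, ha]

lemma py_lcm_dvd_iff {l aa p : Int} : ((Int.lcm l aa : Int) : Int) ∣ p ↔ l ∣ p ∧ aa ∣ p := by
  rw [Int.coe_lcm, lcm_dvd_iff]

-- Invariant lemma: with a zero-free list, state l ≠ 0 and l ∣ p,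
-- A's loop counts the elements dividing p and folds lcm over them.
lemma loopA_eq (p : Int) : ∀ (a : List Int) (c l : Int), (0 : Int) ∉ a → l ≠ 0 → l ∣ p →
    loopA p a (c, l) =
      (c + ((a.filter (fun aa => PySem.Int.mod p aa = 0)).length : Int),
       (a.filter (fun aa => PySem.Int.mod p aa = 0)).foldl (fun acc aa => (Int.lcm acc aa : Int)) l) := by
  intro a
  induction a with
  | nil => intro c l _ _ _; simp [loopA]
  | cons aa rest ih =>
    intro c l hz hl hlp
    have haa : aa ≠ 0 := by intro h; exact hz (h ▸ List.mem_cons_self)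
    have hrest : (0 : Int) ∉ rest := fun h => hz (List.mem_cons_of_mem _ h)
    have hmodstep : PySem.Int.mod p ((Int.lcm l aa : Int)) = 0 ↔ (aa ∣ p) := by
      rw [PySem.Int.mod_eq_zero_iff_dvd]
      rw [py_lcm_dvd_iff]
      exact ⟨fun h => h.2, fun h => ⟨hlp, h⟩⟩
    have hmodel : PySem.Int.mod p aa = 0 ↔ aa ∣ p := PySem.Int.mod_eq_zero_iff_dvd p aa
    by_cases hd : aa ∣ p
    · have h1 : PySem.Int.mod p ((Int.lcm l aa : Int)) = 0 := hmodstep.mpr hd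
      have h2 : PySem.Int.mod p aa = 0 := hmodel.mpr hd
      simp only [loopA, List.foldl_cons, List.filter_cons, h2, decide_true, if_true]
      rw [if_neg (by simp [h1])]
      have := ih (c + 1) ((Int.lcm l aa : Int)) hrest (lcm_ne_zero hl haa)
        (py_lcm_dvd_iff.mpr ⟨hlp, hd⟩)
      simp only [loopA] at this
      rw [this]
      simp only [List.length_cons]
      refine Prod.ext ?_ rfl
      push_cast; ring
    · have h1 : PySem.Int.mod p ((Int.lcm l aa : Int)) ≠ 0 := fun h => hd (hmodstep.mp h)
      have h2 : PySem.Int.mod p aa ≠ 0 := fun h => hd (hmodel.mp h)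
      simp only [loopA, List.foldl_cons, List.filter_cons, h2, decide_false]
      rw [if_pos h1]
      exact ih c l hrest hl hlp

-- ===== VERDICT (by name: the statement is the Claim_ definition above) =====
theorem check_spec : Claim_equal_check := by
  intro p a _ hpre
  unfold Spec_check check check_alt
  have h := loopA_eq p a 0 1 hpre one_ne_zero (one_dvd p)
  simp only [loopA] at h
  simp only [h]
  simp
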